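-- pv_equiv track=rewrite | github.com/uvsq22104773/TER_jeu-isolation | Algorithmes.py | plusGrandSousArbreFirst
-- ===== SOURCE A (Python) =====
-- def calcul(tree, sommet):
--     if sommet not in tree:
--         return 1
--     return 1 + sum(calcul(tree, fils) for fils in tree[sommet])
--
-- def plusGrandSousArbreFirst(tree, ls=None, res=None):
--     if ls is None:
--         ls = [1]
--     if res is None:
--         res = []
--     maxGlobal = 0
--     arêteGlobal = None
--     aTraiter = []
--
--     for s in ls:
--         if s not in tree:
--             continue
--
--         max_local = 0
--         arête = None
--
--         for fs in tree[s]: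
--             aTraiter.append(fs)
--             nb = calcul(tree, fs)
--             if nb > max_local:
--                 max_local = nb
--                 arête = (s, fs)
--
--         if max_local > maxGlobal:
--             maxGlobal = max_local
--             arêteGlobal = arête
--
--     if arêteGlobal:
--         res.append(arêteGlobal)
--         if arêteGlobal[1] in aTraiter:
--             aTraiter.remove(arêteGlobal[1])
--
--     if not aTraiter:
--         return res, maxGlobal
--     else:
--         sub_res, sub_total = plusGrandSousArbreFirst(tree, aTraiter, res)
--         return sub_res, maxGlobal + sub_total
-- ===== SOURCE B (Python) =====
-- def plusGrandSousArbreFirst(tree, ls=None, res=None):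
--     if ls is None:
--         ls = [1]
--     if res is None:
--         res = []
--     size = {}
--
--     def taille(v):
--         if v not in size:
--             size[v] = 1 + sum(map(taille, tree[v])) if v in tree else 1
--         return size[v]
--
--     total = 0
--     frontier = ls
--     while True:
--         edges = [(s, fs) for s in frontier if s in tree for fs in tree[s]]
--         if not edges:
--             return res, total
--         esz = [(e, taille(e[1])) for e in edges]
--         (s, fs), m = max(esz, key=lambda p: p[1])
--         total += m
--         res.append((s, fs))
--         rest = [c for _, c in edges]
--         rest.remove(fs)
--         if not rest:
--             return res, total
--         frontier = rest
-- ===== Notes on version B (the rewrite author's own statement) =====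
-- stated objective: alternative
-- what changed: B flattens each level into one list of (parent,child) edges and picks the chosen edge with a single max(key=subtree size) over that list instead of A's two nested running-maximum loops, computes each subtree size once through a memoised size table instead of A's per-edge recursive recomputation, and replaces A's level recursion with an iterative while loop carrying a running total.
import Mathlib
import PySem

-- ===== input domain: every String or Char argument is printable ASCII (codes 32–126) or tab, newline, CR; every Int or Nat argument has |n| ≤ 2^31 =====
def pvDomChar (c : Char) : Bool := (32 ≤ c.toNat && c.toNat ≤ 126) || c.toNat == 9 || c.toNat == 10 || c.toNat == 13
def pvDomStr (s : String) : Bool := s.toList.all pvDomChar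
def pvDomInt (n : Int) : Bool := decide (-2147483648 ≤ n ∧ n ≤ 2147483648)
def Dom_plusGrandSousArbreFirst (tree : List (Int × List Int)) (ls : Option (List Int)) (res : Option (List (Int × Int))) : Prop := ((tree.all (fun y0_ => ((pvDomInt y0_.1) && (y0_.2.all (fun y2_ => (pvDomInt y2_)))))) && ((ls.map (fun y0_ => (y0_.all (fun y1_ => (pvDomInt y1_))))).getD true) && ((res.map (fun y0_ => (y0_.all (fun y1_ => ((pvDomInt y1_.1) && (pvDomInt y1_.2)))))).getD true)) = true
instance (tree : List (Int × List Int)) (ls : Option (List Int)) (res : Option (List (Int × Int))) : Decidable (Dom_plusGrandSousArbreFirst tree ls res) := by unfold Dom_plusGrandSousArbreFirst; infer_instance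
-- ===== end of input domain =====

-- B flattens each level into one edge list and selects the chosen edge with a single max(key=subtree size) over it,
-- instead of A's two nested running-maximum loops; subtree sizes come from a memoised table instead of A's
-- per-edge recursive recomputation, and A's level recursion becomes an iterative loop with a running total
-- (objective: alternative). Both programs append the chosen edges to the caller's `res` list in place; the
-- theorems are about the return value.

-- ===== PORT A =====
-- dict lookup (first match on the association list)
def pvLook (tree : List (Int × List Int)) (v : Int) : Option (List Int) := (PySem.Dict.mk tree).get? v

-- calcul: naive recursive subtree size; fuel-guarded (Python recurses unboundedly; Pre_ excludes the inputs where that recursion never returns)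
def pvCalcul (tree : List (Int × List Int)) : Nat → Int → Int
  | 0, _ => 0
  | n+1, v =>
    match pvLook tree v with
    | none => 1
    | some cs => 1 + (cs.map (fun c => pvCalcul tree n c)).sum

-- inner 'for fs in tree[s]' loop; state (max_local, arête, aTraiter)
def pvForFilsA (tree : List (Int × List Int)) (s : Int)
    (p0 : Int × Option (Int × Int) × List Int) (cs : List Int) :
    Int × Option (Int × Int) × List Int :=
  cs.foldl (fun p fs =>
    let aT := p.2.2 ++ [fs]
    let nb := pvCalcul tree (tree.length + 1) fs
    if nb > p.1 then (nb, some (s, fs), aT) else (p.1, p.2.1, aT)) p0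

-- outer 'for s in ls' loop; state (maxGlobal, arêteGlobal, aTraiter)
def pvForLsA (tree : List (Int × List Int))
    (st0 : Int × Option (Int × Int) × List Int) (fr : List Int) :
    Int × Option (Int × Int) × List Int :=
  fr.foldl (fun st s =>
    match pvLook tree s with
    | none => st
    | some cs =>
      let r := pvForFilsA tree s (0, none, st.2.2) cs
      if r.1 > st.1 then (r.1, r.2.1, r.2.2) else (st.1, st.2.1, r.2.2)) st0

-- the 'if arêteGlobal: res.append(...); aTraiter.remove(...)' block of A
def pvAfterA (res : List (Int × Int)) : Option (Int × Int) → List Int → List (Int × Int) × List Int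
  | none, aT => (res, aT)
  | some a, aT => (res ++ [a], if a.2 ∈ aT then (PySem.List.remove? aT a.2).getD aT else aT)

def pvMainA (tree : List (Int × List Int)) : Nat → List Int → List (Int × Int) → List (Int × Int) × Int
  | 0, _, res => (res, 0)
  | n+1, fr, res =>
    let st := pvForLsA tree (0, none, []) fr
    let pr := pvAfterA res st.2.1 st.2.2
    if pr.2 = [] then (pr.1, st.1)
    else
      let sub := pvMainA tree n pr.2 pr.1
      (sub.1, st.1 + sub.2)

def plusGrandSousArbreFirst (tree : List (Int × List Int)) (ls : Option (List Int)) (res : Option (List (Int × Int))) : (List (Int × Int)) × Int :=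
  pvMainA tree (tree.length + 2) (ls.getD [1]) (res.getD [])

-- ===== PORT B =====
-- memoised subtree size (B's `taille`); fuel-guarded like A's calcul
def pvTaille (tree : List (Int × List Int)) : Nat → Int → PySem.Dict Int Int → Int × PySem.Dict Int Int
  | 0, _, memo => (0, memo)
  | n+1, v, memo =>
    match memo.get? v with
    | some t => (t, memo)
    | none =>
      match pvLook tree v with
      | none => (1, memo.insert v 1)
      | some cs =>
        let p := cs.foldl (fun (p : Int × PySem.Dict Int Int) c =>
            let q := pvTaille tree n c p.2
            (p.1 + q.1, q.2)) (0, memo)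
        (1 + p.1, p.2.insert v (1 + p.1))

-- 'edges = [(s, fs) for s in frontier if s in tree for fs in tree[s]]'
def pvEdgesB (tree : List (Int × List Int)) (fr : List Int) : List (Int × Int) :=
  fr.flatMap (fun s =>
    match pvLook tree s with
    | none => []
    | some cs => cs.map (fun fs => (s, fs)))

-- 'esz = [(e, taille(e[1])) for e in edges]' — one pass threading the size table
def pvEszB (tree : List (Int × List Int)) (edges : List (Int × Int)) (memo : PySem.Dict Int Int) :
    List ((Int × Int) × Int) × PySem.Dict Int Int :=
  edges.foldl (fun (p : List ((Int × Int) × Int) × PySem.Dict Int Int) e =>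
    let q := pvTaille tree (tree.length + 1) e.2 p.2
    (p.1 ++ [(e, q.1)], q.2)) ([], memo)

-- B's 'while True' level loop; fuel-guarded like A's recursion
def pvLoopB (tree : List (Int × List Int)) : Nat → List Int → List (Int × Int) → Int → PySem.Dict Int Int → (List (Int × Int)) × Int
  | 0, _, res, total, _ => (res, total)
  | n+1, fr, res, total, memo =>
    let edges := pvEdgesB tree fr
    if edges = [] then (res, total)
    else
      let p := pvEszB tree edges memo
      match PySem.List.max? p.1 (fun q => q.2) with
      | none => (res, total)            -- unreachable: edges ≠ [] so esz ≠ []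
      | some q =>
        let total' := total + q.2
        let res' := res ++ [q.1]
        -- 'rest.remove(fs)': q.1.2 was chosen from edges, so it is always present and list.remove never raises
        let rest := (PySem.List.remove? (edges.map Prod.snd) q.1.2).getD (edges.map Prod.snd)
        if rest = [] then (res', total') else pvLoopB tree n rest res' total' p.2

def plusGrandSousArbreFirst_alt (tree : List (Int × List Int)) (ls : Option (List Int)) (res : Option (List (Int × Int))) : (List (Int × Int)) × Int :=
  pvLoopB tree (tree.length + 2) (ls.getD [1]) (res.getD []) 0 PySem.Dict.empty

-- ===== PRECONDITION & SPEC =====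
-- closure machinery naming the set of nodes reachable from the start list through the child lists
def pvChilds (tree : List (Int × List Int)) (v : Int) : List Int := (pvLook tree v).getD []

def pvStepF (tree : List (Int × List Int)) (s : Finset Int) : Finset Int :=
  s ∪ s.biUnion (fun v => (pvChilds tree v).toFinset)

def pvClosF (tree : List (Int × List Int)) : Nat → Finset Int → Finset Int
  | 0, s => s
  | n+1, s => pvClosF tree n (pvStepF tree s)

def pvFuel (tree : List (Int × List Int)) : Nat := 2 * tree.length + 2

def pvC (tree : List (Int × List Int)) (ls : Option (List Int)) : Finset Int :=
  pvClosF tree (pvFuel tree) (ls.getD [1]).toFinset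

-- Pre_ excludes exactly the inputs on which a cycle of the child graph is reachable from the start list: there the
-- Python A recurses without bound (RecursionError).  The two fixpoint conjuncts hold on EVERY input (the closure
-- saturates within 2·|tree|+2 steps); they are stated only so the proofs may use the saturated closures by name.
def Pre_plusGrandSousArbreFirst (tree : List (Int × List Int)) (ls : Option (List Int)) (res : Option (List (Int × Int))) : Prop :=
  pvStepF tree (pvC tree ls) = pvC tree ls ∧
  (∀ k ∈ tree.map Prod.fst, pvStepF tree (pvClosF tree (pvFuel tree) {k}) = pvClosF tree (pvFuel tree) {k}) ∧
  (∀ k ∈ tree.map Prod.fst, k ∈ pvC tree ls → k ∉ pvClosF tree (pvFuel tree) (pvChilds tree k).toFinset)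

instance (tree : List (Int × List Int)) (ls : Option (List Int)) (res : Option (List (Int × Int))) : Decidable (Pre_plusGrandSousArbreFirst tree ls res) := by unfold Pre_plusGrandSousArbreFirst; infer_instance

def pvWitness_plusGrandSousArbreFirst : (List (Int × List Int)) × Option (List Int) × (Option (List (Int × Int))) :=
  ([(1, [2, 3]), (2, [4])], none, none)

def Spec_plusGrandSousArbreFirst (tree : List (Int × List Int)) (ls : Option (List Int)) (res : Option (List (Int × Int))) (out : (List (Int × Int)) × Int) : Prop := out = plusGrandSousArbreFirst_alt tree ls res
instance (tree : List (Int × List Int)) (ls : Option (List Int)) (res : Option (List (Int × Int))) (out : (List (Int × Int)) × Int) : Decidable (Spec_plusGrandSousArbreFirst tree ls res out) := by unfold Spec_plusGrandSousArbreFirst; infer_instance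

-- ===== CLAIM (what is proved, stated in full; the proofs are below) =====
def Claim_equal_plusGrandSousArbreFirst : Prop := ∀ (tree : List (Int × List Int)) (ls : Option (List Int)) (res : Option (List (Int × Int))), Dom_plusGrandSousArbreFirst tree ls res → Pre_plusGrandSousArbreFirst tree ls res → Spec_plusGrandSousArbreFirst tree ls res (plusGrandSousArbreFirst tree ls res)

-- ===== LEMMAS AND PROOFS =====
def pvKeysF (tree : List (Int × List Int)) : Finset Int := (tree.map Prod.fst).toFinset

def pvRank (tree : List (Int × List Int)) (v : Int) : Nat :=
  (pvKeysF tree ∩ pvClosF tree (pvFuel tree) {v}).card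

def pvTrue (tree : List (Int × List Int)) (v : Int) : Int := pvCalcul tree (tree.length + 1) v

def pvGood (tree : List (Int × List Int)) (memo : PySem.Dict Int Int) : Prop :=
  ∀ k t, memo.get? k = some t → t = pvTrue tree k

-- the flat per-edge running-max step A's nested loops amount to
def pvFlat (tree : List (Int × List Int)) (st : Int × Option (Int × Int)) (e : Int × Int) : Int × Option (Int × Int) :=
  if pvTrue tree e.2 > st.1 then (pvTrue tree e.2, some e) else st

def pvFlatP (st : Int × Option (Int × Int)) (p : (Int × Int) × Int) : Int × Option (Int × Int) :=
  if p.2 > st.1 then (p.2, some p.1) else st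

def pvMaxF (p : (Int × Int) × Int) (t : List ((Int × Int) × Int)) : (Int × Int) × Int :=
  t.foldl (fun m x => if m.2 < x.2 then x else m) p

theorem pv_subset_stepF (tree : List (Int × List Int)) (s : Finset Int) : s ⊆ pvStepF tree s :=
  Finset.subset_union_left

theorem pv_stepF_mono (tree : List (Int × List Int)) {s t : Finset Int} (h : s ⊆ t) :
    pvStepF tree s ⊆ pvStepF tree t :=
  Finset.union_subset_union h (Finset.biUnion_subset_biUnion_of_subset_left _ h)

theorem pv_closF_mono (tree : List (Int × List Int)) (n : Nat) :
    ∀ {s t : Finset Int}, s ⊆ t → pvClosF tree n s ⊆ pvClosF tree n t := by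
  induction n with
  | zero => intro s t h; exact h
  | succ n ih => intro s t h; exact ih (pv_stepF_mono tree h)

theorem pv_subset_closF (tree : List (Int × List Int)) (n : Nat) (s : Finset Int) :
    s ⊆ pvClosF tree n s := by
  induction n generalizing s with
  | zero => exact subset_rfl
  | succ n ih => exact (pv_subset_stepF tree s).trans (ih _)

theorem pv_closF_absorb (tree : List (Int × List Int)) (n : Nat) :
    ∀ {s t : Finset Int}, pvStepF tree t = t → s ⊆ t → pvClosF tree n s ⊆ t := by
  induction n with
  | zero => intro s t _ h; exact h
  | succ n ih =>
    intro s t hfix h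
    exact ih hfix ((pv_stepF_mono tree h).trans (le_of_eq hfix))

theorem pv_childs_mem_step (tree : List (Int × List Int)) {v c : Int} {s : Finset Int}
    (hv : v ∈ s) (hc : c ∈ pvChilds tree v) : c ∈ pvStepF tree s :=
  Finset.mem_union_right _ (Finset.mem_biUnion.2 ⟨v, hv, List.mem_toFinset.2 hc⟩)

theorem pv_look_some_mem_keys (tree : List (Int × List Int)) {v : Int} {cs : List Int}
    (h : pvLook tree v = some cs) : v ∈ tree.map Prod.fst := by
  by_contra hv
  rw [pvLook] at h
  have : (PySem.Dict.mk tree).get? v = none := by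
    rw [PySem.Dict.get?_eq_none_iff_not_mem_keys]
    simpa [PySem.Dict.keys] using hv
  simp [this] at h

theorem pv_look_none_of_not_mem (tree : List (Int × List Int)) {v : Int}
    (h : v ∉ tree.map Prod.fst) : pvLook tree v = none := by
  rw [pvLook, PySem.Dict.get?_eq_none_iff_not_mem_keys]
  simpa [PySem.Dict.keys] using h

theorem pv_rank_le (tree : List (Int × List Int)) (v : Int) : pvRank tree v ≤ tree.length := by
  have h1 : (pvKeysF tree ∩ pvClosF tree (pvFuel tree) {v}).card ≤ (pvKeysF tree).card :=
    Finset.card_le_card Finset.inter_subset_left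
  have h2 : (pvKeysF tree).card ≤ (tree.map Prod.fst).length := List.toFinset_card_le _
  simpa [pvRank] using h1.trans (by simpa using h2)

theorem pv_mem_C_child (tree : List (Int × List Int)) (ls : Option (List Int))
    (hP1 : pvStepF tree (pvC tree ls) = pvC tree ls) {v c : Int}
    (hv : v ∈ pvC tree ls) (hc : c ∈ pvChilds tree v) : c ∈ pvC tree ls := by
  rw [← hP1]; exact pv_childs_mem_step tree hv hc

theorem pv_rank_lt (tree : List (Int × List Int)) (ls : Option (List Int))
    (hP2 : ∀ k ∈ tree.map Prod.fst, pvStepF tree (pvClosF tree (pvFuel tree) {k}) = pvClosF tree (pvFuel tree) {k})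
    (hP3 : ∀ k ∈ tree.map Prod.fst, k ∈ pvC tree ls → k ∉ pvClosF tree (pvFuel tree) (pvChilds tree k).toFinset)
    {v c : Int} (hk : v ∈ tree.map Prod.fst) (hvC : v ∈ pvC tree ls)
    (hc : c ∈ pvChilds tree v) : pvRank tree c < pvRank tree v := by
  have hfix := hP2 v hk
  have hvv : v ∈ pvClosF tree (pvFuel tree) {v} := pv_subset_closF tree _ _ (Finset.mem_singleton_self v)
  have hcv : c ∈ pvClosF tree (pvFuel tree) {v} := by
    rw [← hfix]; exact pv_childs_mem_step tree hvv hc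
  have hsub : pvClosF tree (pvFuel tree) {c} ⊆ pvClosF tree (pvFuel tree) {v} :=
    pv_closF_absorb tree _ hfix (Finset.singleton_subset_iff.2 hcv)
  have hnv : v ∉ pvClosF tree (pvFuel tree) {c} := by
    intro hmem
    exact hP3 v hk hvC (pv_closF_mono tree _ (by simpa [Finset.singleton_subset_iff] using List.mem_toFinset.2 hc) hmem)
  apply Finset.card_lt_card
  constructor
  · exact Finset.inter_subset_inter subset_rfl hsub
  · intro hss
    exact hnv (Finset.mem_of_mem_inter_right (hss (Finset.mem_inter.2 ⟨List.mem_toFinset.2 hk, hvv⟩)))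

theorem pv_mem_remove (aT : List Int) (y : Int) {x : Int}
    (hx : x ∈ (PySem.List.remove? aT y).getD aT) : x ∈ aT := by
  by_cases hy : y ∈ aT
  · rw [PySem.List.remove?_eq_some_erase aT y hy] at hx
    exact List.mem_of_mem_erase hx
  · rwa [(PySem.List.remove?_eq_none_iff aT y).2 hy] at hx

theorem pv_rank_pos_of_key (tree : List (Int × List Int)) {v : Int}
    (hk : v ∈ tree.map Prod.fst) : 0 < pvRank tree v := by
  apply Finset.card_pos.2
  exact ⟨v, Finset.mem_inter.2 ⟨List.mem_toFinset.2 hk,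
    pv_subset_closF tree _ _ (Finset.mem_singleton_self v)⟩⟩

theorem pv_stab (tree : List (Int × List Int)) (ls : Option (List Int))
    (hP1 : pvStepF tree (pvC tree ls) = pvC tree ls)
    (hP2 : ∀ k ∈ tree.map Prod.fst, pvStepF tree (pvClosF tree (pvFuel tree) {k}) = pvClosF tree (pvFuel tree) {k})
    (hP3 : ∀ k ∈ tree.map Prod.fst, k ∈ pvC tree ls → k ∉ pvClosF tree (pvFuel tree) (pvChilds tree k).toFinset) :
    ∀ (n : Nat) (v : Int) (m : Nat), v ∈ pvC tree ls → pvRank tree v ≤ n → pvRank tree v < m →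
      pvCalcul tree m v = pvTrue tree v := by
  intro n
  induction n with
  | zero =>
    intro v m hvC hr hm
    obtain ⟨m', rfl⟩ : ∃ m', m = m' + 1 := ⟨m - 1, by omega⟩
    have hk : v ∉ tree.map Prod.fst := by
      intro hk; exact absurd (pv_rank_pos_of_key tree hk) (by omega)
    have hlook := pv_look_none_of_not_mem tree hk
    simp [pvTrue, pvCalcul, hlook]
  | succ n ih =>
    intro v m hvC hr hm
    obtain ⟨m', rfl⟩ : ∃ m', m = m' + 1 := ⟨m - 1, by omega⟩
    cases hlook : pvLook tree v with
    | none => simp [pvTrue, pvCalcul, hlook]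
    | some cs =>
      have hk : v ∈ tree.map Prod.fst := pv_look_some_mem_keys tree hlook
      have hcs : ∀ c ∈ cs, c ∈ pvChilds tree v := by
        intro c hc; simp [pvChilds, hlook, hc]
      have hrec : ∀ c ∈ cs, pvCalcul tree m' c = pvTrue tree c ∧ pvCalcul tree tree.length c = pvTrue tree c := by
        intro c hc
        have hcC : c ∈ pvC tree ls := pv_mem_C_child tree ls hP1 hvC (hcs c hc)
        have hlt : pvRank tree c < pvRank tree v := pv_rank_lt tree ls hP2 hP3 hk hvC (hcs c hc)
        have hL : pvRank tree v ≤ tree.length := pv_rank_le tree v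
        exact ⟨ih c m' hcC (by omega) (by omega), ih c tree.length hcC (by omega) (by omega)⟩
      have h1 : cs.map (fun c => pvCalcul tree m' c) = cs.map (pvTrue tree) :=
        List.map_congr_left (fun c hc => (hrec c hc).1)
      have h2 : cs.map (fun c => pvCalcul tree tree.length c) = cs.map (pvTrue tree) :=
        List.map_congr_left (fun c hc => (hrec c hc).2)
      show pvCalcul tree (m' + 1) v = pvCalcul tree (tree.length + 1) v
      simp only [pvCalcul, hlook, h1, h2]

theorem pv_taille_spec (tree : List (Int × List Int)) (ls : Option (List Int))
    (hP1 : pvStepF tree (pvC tree ls) = pvC tree ls)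
    (hP2 : ∀ k ∈ tree.map Prod.fst, pvStepF tree (pvClosF tree (pvFuel tree) {k}) = pvClosF tree (pvFuel tree) {k})
    (hP3 : ∀ k ∈ tree.map Prod.fst, k ∈ pvC tree ls → k ∉ pvClosF tree (pvFuel tree) (pvChilds tree k).toFinset) :
    ∀ (n : Nat) (v : Int) (m : Nat) (memo : PySem.Dict Int Int), v ∈ pvC tree ls → pvRank tree v ≤ n →
      pvRank tree v < m → pvGood tree memo →
      (pvTaille tree m v memo).1 = pvTrue tree v ∧ pvGood tree (pvTaille tree m v memo).2 := by
  intro n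
  induction n with
  | zero =>
    intro v m memo hvC hr hm hgood
    obtain ⟨m', rfl⟩ : ∃ m', m = m' + 1 := ⟨m - 1, by omega⟩
    have hk : v ∉ tree.map Prod.fst := by
      intro hk; exact absurd (pv_rank_pos_of_key tree hk) (by omega)
    have hlook := pv_look_none_of_not_mem tree hk
    have htrue : pvTrue tree v = 1 := by simp [pvTrue, pvCalcul, hlook]
    cases hmemo : memo.get? v with
    | some t =>
      simp only [pvTaille, hmemo]
      exact ⟨hgood v t hmemo, hgood⟩
    | none =>
      simp only [pvTaille, hmemo, hlook]
      refine ⟨htrue.symm, ?_⟩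
      intro k t hk'
      rw [PySem.Dict.get?_insert] at hk'
      by_cases hkv : k = v
      · simp [hkv] at hk'; subst hkv; omega
      · simp [hkv] at hk'; exact hgood k t hk'
  | succ n ih =>
    intro v m memo hvC hr hm hgood
    obtain ⟨m', rfl⟩ : ∃ m', m = m' + 1 := ⟨m - 1, by omega⟩
    cases hmemo : memo.get? v with
    | some t =>
      simp only [pvTaille, hmemo]
      exact ⟨hgood v t hmemo, hgood⟩
    | none =>
      cases hlook : pvLook tree v with
      | none =>
        have htrue : pvTrue tree v = 1 := by simp [pvTrue, pvCalcul, hlook]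
        simp only [pvTaille, hmemo, hlook]
        refine ⟨htrue.symm, ?_⟩
        intro k t hk'
        rw [PySem.Dict.get?_insert] at hk'
        by_cases hkv : k = v
        · simp [hkv] at hk'; subst hkv; omega
        · simp [hkv] at hk'; exact hgood k t hk'
      | some cs =>
        have hk : v ∈ tree.map Prod.fst := pv_look_some_mem_keys tree hlook
        have hcs : ∀ c ∈ cs, c ∈ pvChilds tree v := by
          intro c hc; simp [pvChilds, hlook, hc]
        have hprop : ∀ c ∈ cs, c ∈ pvC tree ls ∧ pvRank tree c ≤ n ∧ pvRank tree c < m' := by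
          intro c hc
          have hcC : c ∈ pvC tree ls := pv_mem_C_child tree ls hP1 hvC (hcs c hc)
          have hlt : pvRank tree c < pvRank tree v := pv_rank_lt tree ls hP2 hP3 hk hvC (hcs c hc)
          exact ⟨hcC, by omega, by omega⟩
        have aux : ∀ (l : List Int), (∀ c ∈ l, c ∈ cs) → ∀ (acc : Int) (memo' : PySem.Dict Int Int),
            pvGood tree memo' →
            (l.foldl (fun (p : Int × PySem.Dict Int Int) c =>
              (p.1 + (pvTaille tree m' c p.2).1, (pvTaille tree m' c p.2).2)) (acc, memo')).1
              = acc + (l.map (pvTrue tree)).sum ∧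
            pvGood tree (l.foldl (fun (p : Int × PySem.Dict Int Int) c =>
              (p.1 + (pvTaille tree m' c p.2).1, (pvTaille tree m' c p.2).2)) (acc, memo')).2 := by
          intro l
          induction l with
          | nil => intro _ acc memo' hg; simp [hg]
          | cons c rest ihl =>
            intro hmem acc memo' hg
            obtain ⟨hcC, hcn, hcm⟩ := hprop c (hmem c (by simp))
            obtain ⟨hval, hg'⟩ := ih c m' memo' hcC hcn hcm hg
            have := ihl (fun x hx => hmem x (by simp [hx])) (acc + (pvTaille tree m' c memo').1)
              (pvTaille tree m' c memo').2 hg'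
            simp only [List.foldl_cons, List.map_cons, List.sum_cons]
            refine ⟨?_, this.2⟩
            rw [this.1, hval]; ring
        have htrue : pvTrue tree v = 1 + (cs.map (pvTrue tree)).sum := by
          have h2 : cs.map (fun c => pvCalcul tree tree.length c) = cs.map (pvTrue tree) := by
            apply List.map_congr_left
            intro c hc
            obtain ⟨hcC, hcn, _⟩ := hprop c hc
            have hlt : pvRank tree c < pvRank tree v := pv_rank_lt tree ls hP2 hP3 hk hvC (hcs c hc)
            have hL : pvRank tree v ≤ tree.length := pv_rank_le tree v
            exact pv_stab tree ls hP1 hP2 hP3 n c tree.length hcC hcn (by omega)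
          simp only [pvTrue, pvCalcul, hlook, h2]
        obtain ⟨hfold, hgf⟩ := aux cs (fun c hc => hc) 0 memo hgood
        simp only [pvTaille, hmemo, hlook]
        constructor
        · rw [hfold, htrue]; ring
        · intro k t hk'
          rw [PySem.Dict.get?_insert] at hk'
          by_cases hkv : k = v
          · simp [hkv] at hk'; subst hkv; rw [← hk', htrue, hfold]; ring
          · simp [hkv] at hk'; exact hgf k t hk'

-- pvCalcul is nonnegative, and at positive fuel at least 1
theorem pv_calcul_nonneg (tree : List (Int × List Int)) : ∀ (m : Nat) (v : Int), 0 ≤ pvCalcul tree m v := by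
  intro m
  induction m with
  | zero => intro v; simp [pvCalcul]
  | succ m ih =>
    intro v
    cases hlook : pvLook tree v with
    | none => simp [pvCalcul, hlook]
    | some cs =>
      have hsum : 0 ≤ (cs.map (fun c => pvCalcul tree m c)).sum := by
        apply List.sum_nonneg
        intro x hx
        obtain ⟨c, _, rfl⟩ := List.mem_map.1 hx
        exact ih c
      simp only [pvCalcul, hlook]
      omega

theorem pv_true_pos (tree : List (Int × List Int)) (v : Int) : 1 ≤ pvTrue tree v := by
  cases hlook : pvLook tree v with
  | none => simp [pvTrue, pvCalcul, hlook]
  | some cs =>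
    have hsum : 0 ≤ (cs.map (fun c => pvCalcul tree tree.length c)).sum := by
      apply List.sum_nonneg
      intro x hx
      obtain ⟨c, _, rfl⟩ := List.mem_map.1 hx
      exact pv_calcul_nonneg tree tree.length c
    simp only [pvTrue, pvCalcul, hlook]
    omega

-- A's inner loop, characterised: it appends cs to aTraiter and its merged running max is the flat fold over the edges
theorem pv_fils_flat (tree : List (Int × List Int)) (s : Int) :
    ∀ (cs : List Int) (m : Int) (a : Option (Int × Int)) (mx : Int) (ar : Option (Int × Int)) (aT : List Int),
      (pvForFilsA tree s (m, a, aT) cs).2.2 = aT ++ cs ∧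
      (if (pvForFilsA tree s (m, a, aT) cs).1 > mx
        then ((pvForFilsA tree s (m, a, aT) cs).1, (pvForFilsA tree s (m, a, aT) cs).2.1)
        else (mx, ar))
        = List.foldl (pvFlat tree) (if m > mx then (m, a) else (mx, ar)) (cs.map (fun fs => (s, fs))) := by
  intro cs
  induction cs with
  | nil => intro m a mx ar aT; simp [pvForFilsA]
  | cons fs rest ih =>
    intro m a mx ar aT
    have hstep : pvForFilsA tree s (m, a, aT) (fs :: rest)
        = pvForFilsA tree s
            (if pvCalcul tree (tree.length + 1) fs > m
              then (pvCalcul tree (tree.length + 1) fs, some (s, fs), aT ++ [fs])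
              else (m, a, aT ++ [fs])) rest := by
      simp only [pvForFilsA, List.foldl_cons]
    by_cases h1 : pvCalcul tree (tree.length + 1) fs > m
    · rw [hstep, if_pos h1]
      obtain ⟨hA, hB⟩ := ih (pvCalcul tree (tree.length + 1) fs) (some (s, fs)) mx ar (aT ++ [fs])
      refine ⟨by rw [hA]; simp, ?_⟩
      rw [hB, List.map_cons, List.foldl_cons]
      congr 1
      simp only [pvFlat, pvTrue]
      split_ifs <;> first | rfl | (exfalso; omega)
    · rw [hstep, if_neg h1]
      obtain ⟨hA, hB⟩ := ih m a mx ar (aT ++ [fs])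
      refine ⟨by rw [hA]; simp, ?_⟩
      rw [hB, List.map_cons, List.foldl_cons]
      congr 1
      simp only [pvFlat, pvTrue]
      split_ifs <;> first | rfl | (exfalso; omega)

-- A's outer loop, characterised: aTraiter collects all children and the running max is the flat fold over all edges
theorem pv_ls_flat (tree : List (Int × List Int)) :
    ∀ (fr : List Int) (mx : Int) (ar : Option (Int × Int)) (aT : List Int), 0 ≤ mx →
      (pvForLsA tree (mx, ar, aT) fr).2.2 = aT ++ (pvEdgesB tree fr).map Prod.snd ∧
      ((pvForLsA tree (mx, ar, aT) fr).1, (pvForLsA tree (mx, ar, aT) fr).2.1)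
        = List.foldl (pvFlat tree) (mx, ar) (pvEdgesB tree fr) := by
  intro fr
  induction fr with
  | nil => intro mx ar aT _; simp [pvForLsA, pvEdgesB]
  | cons s rest ih =>
    intro mx ar aT hmx
    cases hlook : pvLook tree s with
    | none =>
      have hE : pvEdgesB tree (s :: rest) = pvEdgesB tree rest := by
        simp [pvEdgesB, hlook]
      have hL : pvForLsA tree (mx, ar, aT) (s :: rest) = pvForLsA tree (mx, ar, aT) rest := by
        simp only [pvForLsA, List.foldl_cons, hlook]
      rw [hE, hL]
      exact ih mx ar aT hmx
    | some cs =>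
      obtain ⟨hA, hB⟩ := pv_fils_flat tree s cs 0 none mx ar aT
      rw [if_neg (show ¬((0 : Int) > mx) from by omega)] at hB
      have hE : pvEdgesB tree (s :: rest)
          = cs.map (fun fs => (s, fs)) ++ pvEdgesB tree rest := by
        simp [pvEdgesB, hlook]
      by_cases hgt : (pvForFilsA tree s (0, none, aT) cs).1 > mx
      · rw [if_pos hgt] at hB
        have hstep : pvForLsA tree (mx, ar, aT) (s :: rest)
            = pvForLsA tree ((pvForFilsA tree s (0, none, aT) cs).1,
                (pvForFilsA tree s (0, none, aT) cs).2.1,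
                (pvForFilsA tree s (0, none, aT) cs).2.2) rest := by
          simp only [pvForLsA, List.foldl_cons, hlook]
          rw [if_pos hgt]
        obtain ⟨hA', hB'⟩ := ih (pvForFilsA tree s (0, none, aT) cs).1
          (pvForFilsA tree s (0, none, aT) cs).2.1
          (pvForFilsA tree s (0, none, aT) cs).2.2 (by omega)
        rw [hstep, hE]
        refine ⟨by rw [hA', hA]; simp, ?_⟩
        rw [List.foldl_append, ← hB]
        exact hB'
      · rw [if_neg hgt] at hB
        have hstep : pvForLsA tree (mx, ar, aT) (s :: rest)
            = pvForLsA tree (mx, ar, (pvForFilsA tree s (0, none, aT) cs).2.2) rest := by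
          simp only [pvForLsA, List.foldl_cons, hlook]
          rw [if_neg hgt]
        obtain ⟨hA', hB'⟩ := ih mx ar (pvForFilsA tree s (0, none, aT) cs).2.2 hmx
        rw [hstep, hE]
        refine ⟨by rw [hA', hA]; simp, ?_⟩
        rw [List.foldl_append, ← hB]
        exact hB'

-- running-max fold of Python's max(key=): keeps the FIRST maximal element
theorem pv_maxF_ge (t : List ((Int × Int) × Int)) : ∀ (p : (Int × Int) × Int), p.2 ≤ (pvMaxF p t).2 := by
  induction t with
  | nil => intro p; simp [pvMaxF]
  | cons x t ih =>
    intro p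
    have hstep : pvMaxF p (x :: t) = pvMaxF (if p.2 < x.2 then x else p) t := by
      simp only [pvMaxF, List.foldl_cons]
    rw [hstep]
    by_cases h : p.2 < x.2
    · rw [if_pos h]
      have := ih x
      omega
    · rw [if_neg h]
      exact ih p

theorem pv_maxF_mem (t : List ((Int × Int) × Int)) : ∀ (p : (Int × Int) × Int), pvMaxF p t ∈ p :: t := by
  induction t with
  | nil => intro p; simp [pvMaxF]
  | cons x t ih =>
    intro p
    have hstep : pvMaxF p (x :: t) = pvMaxF (if p.2 < x.2 then x else p) t := by
      simp only [pvMaxF, List.foldl_cons]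
    rw [hstep]
    by_cases h : p.2 < x.2
    · rw [if_pos h]
      rcases List.mem_cons.1 (ih x) with h' | h' <;> simp [h']
    · rw [if_neg h]
      rcases List.mem_cons.1 (ih p) with h' | h' <;> simp [h']

theorem pv_max?_cons : ∀ (t : List ((Int × Int) × Int)) (p : (Int × Int) × Int),
    PySem.List.max? (p :: t) (fun q => q.2) = some (pvMaxF p t) := by
  intro t
  induction t with
  | nil => intro p; simp [PySem.List.max?, pvMaxF]
  | cons x t ih =>
    intro p
    have hstep : pvMaxF p (x :: t) = pvMaxF (if p.2 < x.2 then x else p) t := by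
      simp only [pvMaxF, List.foldl_cons]
    have hM : PySem.List.max? (p :: x :: t) (fun q : (Int × Int) × Int => q.2)
        = PySem.List.max? ((if p.2 < x.2 then x else p) :: t) (fun q => q.2) := by
      simp only [PySem.List.max?, List.foldl_cons]
      congr 1
      by_cases h : p.2 < x.2 <;> simp [h]
    rw [hM, ih, hstep]

-- the flat running-max fold computes exactly 'take the first maximal element if it beats the initial max'
theorem pv_flatP_maxF :
    ∀ (t : List ((Int × Int) × Int)) (p : (Int × Int) × Int) (mx : Int) (ar : Option (Int × Int)),
      List.foldl pvFlatP (pvFlatP (mx, ar) p) t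
        = if (pvMaxF p t).2 > mx then ((pvMaxF p t).2, some (pvMaxF p t).1) else (mx, ar) := by
  intro t
  induction t with
  | nil =>
    intro p mx ar
    simp [pvMaxF, pvFlatP]
  | cons x t ih =>
    intro p mx ar
    have hstep : pvMaxF p (x :: t) = pvMaxF (if p.2 < x.2 then x else p) t := by
      simp only [pvMaxF, List.foldl_cons]
    have hkey : pvFlatP (pvFlatP (mx, ar) p) x = pvFlatP (mx, ar) (if p.2 < x.2 then x else p) := by
      simp only [pvFlatP]
      split_ifs <;> first | rfl | (exfalso; omega)
    rw [List.foldl_cons, hkey, hstep]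
    exact ih (if p.2 < x.2 then x else p) mx ar

theorem pv_flat_eq_flatP (tree : List (Int × List Int)) (edges : List (Int × Int)) (st : Int × Option (Int × Int)) :
    List.foldl (pvFlat tree) st edges
      = List.foldl pvFlatP st (edges.map (fun e => (e, pvTrue tree e.2))) := by
  rw [List.foldl_map]
  rfl

-- membership of edge endpoints in the reachable closure
theorem pv_edges_sub (tree : List (Int × List Int)) (ls : Option (List Int))
    (hP1 : pvStepF tree (pvC tree ls) = pvC tree ls)
    (fr : List Int) (hfr : ∀ x ∈ fr, x ∈ pvC tree ls) :
    ∀ e ∈ pvEdgesB tree fr, e.2 ∈ pvC tree ls := by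
  intro e he
  obtain ⟨s, hs, he'⟩ := List.mem_flatMap.1 he
  cases hlook : pvLook tree s with
  | none => rw [hlook] at he'; simp at he'
  | some cs =>
    rw [hlook] at he'
    obtain ⟨fs, hfs, rfl⟩ := List.mem_map.1 he'
    exact pv_mem_C_child tree ls hP1 (hfr s hs) (by simp [pvChilds, hlook, hfs])

-- B's esz pass returns the true sizes and keeps the memo table good
theorem pv_esz_spec (tree : List (Int × List Int)) (ls : Option (List Int))
    (hP1 : pvStepF tree (pvC tree ls) = pvC tree ls)
    (hP2 : ∀ k ∈ tree.map Prod.fst, pvStepF tree (pvClosF tree (pvFuel tree) {k}) = pvClosF tree (pvFuel tree) {k})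
    (hP3 : ∀ k ∈ tree.map Prod.fst, k ∈ pvC tree ls → k ∉ pvClosF tree (pvFuel tree) (pvChilds tree k).toFinset) :
    ∀ (edges : List (Int × Int)) (acc : List ((Int × Int) × Int)) (memo : PySem.Dict Int Int),
      pvGood tree memo → (∀ e ∈ edges, e.2 ∈ pvC tree ls) →
      (edges.foldl (fun (p : List ((Int × Int) × Int) × PySem.Dict Int Int) e =>
          (p.1 ++ [(e, (pvTaille tree (tree.length + 1) e.2 p.2).1)], (pvTaille tree (tree.length + 1) e.2 p.2).2)) (acc, memo)).1
        = acc ++ edges.map (fun e => (e, pvTrue tree e.2)) ∧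
      pvGood tree (edges.foldl (fun (p : List ((Int × Int) × Int) × PySem.Dict Int Int) e =>
          (p.1 ++ [(e, (pvTaille tree (tree.length + 1) e.2 p.2).1)], (pvTaille tree (tree.length + 1) e.2 p.2).2)) (acc, memo)).2 := by
  intro edges
  induction edges with
  | nil => intro acc memo hg _; simpa using hg
  | cons e rest ih =>
    intro acc memo hg hmem
    have heC : e.2 ∈ pvC tree ls := hmem e (by simp)
    have hrank : pvRank tree e.2 < tree.length + 1 := by
      have := pv_rank_le tree e.2; omega
    obtain ⟨hval, hg'⟩ := pv_taille_spec tree ls hP1 hP2 hP3 (pvRank tree e.2) e.2 (tree.length + 1)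
      memo heC le_rfl hrank hg
    obtain ⟨h1, h2⟩ := ih (acc ++ [(e, (pvTaille tree (tree.length + 1) e.2 memo).1)])
      (pvTaille tree (tree.length + 1) e.2 memo).2 hg' (fun x hx => hmem x (by simp [hx]))
    simp only [List.foldl_cons]
    refine ⟨?_, h2⟩
    rw [h1, hval]
    simp

-- the level loops are equal: B's running total matches A's sum of level maxima
theorem pv_loop_eq (tree : List (Int × List Int)) (ls : Option (List Int))
    (hP1 : pvStepF tree (pvC tree ls) = pvC tree ls)
    (hP2 : ∀ k ∈ tree.map Prod.fst, pvStepF tree (pvClosF tree (pvFuel tree) {k}) = pvClosF tree (pvFuel tree) {k})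
    (hP3 : ∀ k ∈ tree.map Prod.fst, k ∈ pvC tree ls → k ∉ pvClosF tree (pvFuel tree) (pvChilds tree k).toFinset) :
    ∀ (n : Nat) (fr : List Int) (res : List (Int × Int)) (total : Int) (memo : PySem.Dict Int Int),
      (∀ x ∈ fr, x ∈ pvC tree ls) → pvGood tree memo →
      pvLoopB tree n fr res total memo = ((pvMainA tree n fr res).1, total + (pvMainA tree n fr res).2) := by
  intro n
  induction n with
  | zero => intro fr res total memo _ _; simp [pvMainA, pvLoopB]
  | succ n ih =>
    intro fr res total memo hfr hg
    obtain ⟨hLa, hLb⟩ := pv_ls_flat tree fr 0 none [] le_rfl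
    have hEsub := pv_edges_sub tree ls hP1 fr hfr
    obtain ⟨hEsz, hEg⟩ := pv_esz_spec tree ls hP1 hP2 hP3 (pvEdgesB tree fr) [] memo hg hEsub
    simp only [pvMainA, pvLoopB]
    cases hE : pvEdgesB tree fr with
    | nil =>
      rw [hE] at hLa hLb
      simp only [List.map_nil, List.foldl_nil, List.append_nil] at hLa hLb
      have h1 : (pvForLsA tree (0, none, []) fr).1 = 0 := congrArg Prod.fst hLb
      have h2 : (pvForLsA tree (0, none, []) fr).2.1 = none := congrArg Prod.snd hLb
      simp only [hLa, h1, h2, pvAfterA]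
      simp
    | cons e t =>
      rw [hE] at hLa hLb hEsz hEg
      rw [if_neg (by simp)]
      -- B's esz list is the edges paired with their true sizes
      have hfold : pvEszB tree (e :: t) memo
          = ((e :: t).foldl (fun (p : List ((Int × Int) × Int) × PySem.Dict Int Int) e =>
              (p.1 ++ [(e, (pvTaille tree (tree.length + 1) e.2 p.2).1)], (pvTaille tree (tree.length + 1) e.2 p.2).2)) ([], memo)) := rfl
      have hp1 : (pvEszB tree (e :: t) memo).1
          = (e, pvTrue tree e.2) :: t.map (fun e => (e, pvTrue tree e.2)) := by
        rw [hfold, hEsz]; simp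
      have hpg : pvGood tree (pvEszB tree (e :: t) memo).2 := by rw [hfold]; exact hEg
      set q := pvMaxF (e, pvTrue tree e.2) (t.map (fun e => (e, pvTrue tree e.2))) with hq
      have hmax : PySem.List.max? (pvEszB tree (e :: t) memo).1 (fun q => q.2) = some q := by
        rw [hp1]; exact pv_max?_cons _ _
      -- q is positive and a member of the edge list
      have hqpos : 1 ≤ q.2 := le_trans (pv_true_pos tree e.2) (pv_maxF_ge _ _)
      have hqmem : q ∈ (e, pvTrue tree e.2) :: t.map (fun e => (e, pvTrue tree e.2)) := pv_maxF_mem _ _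
      have hq1mem : q.1 ∈ e :: t := by
        rcases List.mem_cons.1 hqmem with h | h
        · simp [h]
        · obtain ⟨x, hx, hx'⟩ := List.mem_map.1 h
          right; rw [← hx']; exact hx
      -- A's level maximum and edge
      rw [pv_flat_eq_flatP tree (e :: t) ((0 : Int), (none : Option (Int × Int))),
          List.map_cons, List.foldl_cons, pv_flatP_maxF, ← hq,
          if_pos (show q.2 > 0 by omega)] at hLb
      have hst1 : (pvForLsA tree (0, none, []) fr).1 = q.2 := congrArg Prod.fst hLb
      have hst2 : (pvForLsA tree (0, none, []) fr).2.1 = some q.1 := congrArg Prod.snd hLb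
      have hmemq : q.1.2 ∈ (e :: t).map Prod.snd := List.mem_map.2 ⟨q.1, hq1mem, rfl⟩
      simp only [hLa, hst1, hst2, pvAfterA, List.nil_append, hmax]
      rw [if_pos hmemq]
      set rest := (PySem.List.remove? ((e :: t).map Prod.snd) q.1.2).getD ((e :: t).map Prod.snd) with hrest
      by_cases hre : rest = []
      · simp [hre]
      · rw [if_neg hre, if_neg hre]
        have hrsub : ∀ x ∈ rest, x ∈ pvC tree ls := by
          intro x hx
          have hx' : x ∈ (e :: t).map Prod.snd := pv_mem_remove _ _ hx
          obtain ⟨e', he', rfl⟩ := List.mem_map.1 hx'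
          exact hEsub e' (by rw [hE]; exact he')
        rw [ih rest (res ++ [q.1]) (total + q.2) (pvEszB tree (e :: t) memo).2 hrsub hpg]
        simp only [Prod.mk.injEq, true_and]
        ring

-- ===== VERDICT (by name: the statement is the Claim_ definition above) =====
theorem plusGrandSousArbreFirst_spec : Claim_equal_plusGrandSousArbreFirst := by
  intro tree ls res _hdom hpre
  obtain ⟨hP1, hP2, hP3⟩ := hpre
  unfold Spec_plusGrandSousArbreFirst plusGrandSousArbreFirst plusGrandSousArbreFirst_alt
  rw [pv_loop_eq tree ls hP1 hP2 hP3 (tree.length + 2) (ls.getD [1]) (res.getD []) 0 PySem.Dict.empty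
      (fun x hx => pv_subset_closF tree (pvFuel tree) _ (List.mem_toFinset.2 hx))
      (fun k t h => by simp [PySem.Dict.get?_empty] at h)]
  simp
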